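-- pv_equiv track=rewrite | github.com/jaalonso/Exercitium-Python | src/Caminos_en_una_matriz.py | diccionarioCaminos
-- ===== SOURCE A (Python) =====
-- from collections import defaultdict
--
-- def diccionarioCaminos(p: list[list[int]]) -> dict[tuple[int, int], list[list[int]]]:
--     m = len(p)
--     n = len(p[0])
--     q = defaultdict(list)
--     for i in range(1, m + 1):
--         for j in range(1, n + 1):
--             if i == 1:
--                 q[(i, j)] = [[p[0][z-1] for z in range(j, 0, -1)]]
--             elif j == 1:
--                 q[(i, j)] = [[p[z-1][0] for z in range(i, 0, -1)]]
--             else: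
--                 q[(i, j)] = [[p[i-1][j-1]] + cs for cs in q[(i-1, j)] + q[(i, j-1)]]
--     return q
-- ===== SOURCE B (Python) =====
-- def diccionarioCaminos(p: list[list[int]]) -> dict[tuple[int, int], list[list[int]]]:
--     m = len(p)
--     n = len(p[0])
--     memo = {}
--
--     def paths(i, j):
--         if (i, j) in memo:
--             return memo[(i, j)]
--         if i == 1:
--             v = [p[0][:j][::-1]]
--         elif j == 1:
--             v = [[r[0] for r in p[:i]][::-1]]
--         else:
--             v = [[p[i - 1][j - 1]] + cs for cs in paths(i - 1, j) + paths(i, j - 1)]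
--         memo[(i, j)] = v
--         return v
--
--     for i in range(1, m + 1):
--         for j in range(1, n + 1):
--             paths(i, j)
--     return memo
-- ===== Notes on version B (the rewrite author's own statement) =====
-- stated objective: alternative
-- what changed: Replaces A's bottom-up nested-loop dynamic programming over a defaultdict by a top-down memoized recursion paths(i, j) (with slice-based base cases), driven in row-major order so the memo comes out identical.
import Mathlib
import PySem

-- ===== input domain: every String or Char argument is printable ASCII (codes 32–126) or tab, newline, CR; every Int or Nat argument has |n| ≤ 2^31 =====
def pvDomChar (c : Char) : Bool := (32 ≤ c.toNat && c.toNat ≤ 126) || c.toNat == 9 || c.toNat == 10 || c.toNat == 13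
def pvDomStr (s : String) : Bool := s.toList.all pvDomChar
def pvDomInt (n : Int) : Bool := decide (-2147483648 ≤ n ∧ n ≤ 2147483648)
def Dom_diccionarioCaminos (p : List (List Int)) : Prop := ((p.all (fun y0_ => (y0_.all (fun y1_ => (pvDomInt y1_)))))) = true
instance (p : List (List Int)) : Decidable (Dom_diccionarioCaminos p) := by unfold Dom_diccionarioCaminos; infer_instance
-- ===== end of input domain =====

-- B replaces A's bottom-up nested-loop dynamic programming by a memoized top-down
-- recursion (objective: alternative decomposition; same asymptotic cost).

-- ===== PORT A =====
-- Literal port of A's nested loops over a defaultdict.  p[...] indexing is ported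
-- with pyGetD (the IndexError inputs — empty p, rows shorter than p[0] — are excluded
-- by Pre_); q[(i-1,j)] on the defaultdict is getD with default [].
def diccionarioCaminos (p : List (List Int)) : List (Int × Int × List (List Int)) :=
  let m : Int := p.length
  let n : Int := ((PySem.List.pyGetD p 0 []).length : Int)
  let q : PySem.Dict (Int × Int) (List (List Int)) :=
    (PySem.List.pyRange 1 (m + 1) 1).foldl (fun q i =>
      (PySem.List.pyRange 1 (n + 1) 1).foldl (fun q j =>
        if i = 1 then
          q.insert (i, j)
            [(PySem.List.pyRange j 0 (-1)).map
              (fun z => PySem.List.pyGetD (PySem.List.pyGetD p 0 []) (z - 1) 0)]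
        else if j = 1 then
          q.insert (i, j)
            [(PySem.List.pyRange i 0 (-1)).map
              (fun z => PySem.List.pyGetD (PySem.List.pyGetD p (z - 1) []) 0 0)]
        else
          q.insert (i, j)
            ((q.getD (i - 1, j) [] ++ q.getD (i, j - 1) []).map
              (fun cs => PySem.List.pyGetD (PySem.List.pyGetD p (i - 1) []) (j - 1) 0 :: cs)))
        q)
      PySem.Dict.empty
  q.items.map (fun kv => (kv.1.1, kv.1.2, kv.2))

-- ===== PORT B =====
-- paths(i, j) from Source B: memo hit first, then the two slice-based base cases, else the
-- two recursive calls threading the memo.  The Lean guards are 'i ≤ 1' / 'j ≤ 1' where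
-- the Python tests 'i == 1' / 'j == 1' (paths is only ever called with i, j ≥ 1; the
-- relaxed guard only makes the recursion total).
def pathsAlt (p : List (List Int)) (i j : Nat)
    (memo : PySem.Dict (Int × Int) (List (List Int))) :
    List (List Int) × PySem.Dict (Int × Int) (List (List Int)) :=
  match memo.get? ((i : Int), (j : Int)) with
  | some v => (v, memo)
  | none =>
    if _h1 : i ≤ 1 then
      -- v = [p[0][:j][::-1]]
      let v := [((PySem.List.slice? (PySem.List.slice (PySem.List.pyGetD p 0 []) none (some (j : Int))) none none (-1)).getD [])]
      (v, memo.insert ((i : Int), (j : Int)) v)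
    else if _h2 : j ≤ 1 then
      -- v = [[r[0] for r in p[:i]][::-1]]
      let v := [((PySem.List.slice? ((PySem.List.slice p none (some (i : Int))).map (fun r => PySem.List.pyGetD r 0 0)) none none (-1)).getD [])]
      (v, memo.insert ((i : Int), (j : Int)) v)
    else
      let r1 := pathsAlt p (i - 1) j memo
      let r2 := pathsAlt p i (j - 1) r1.2
      let v := (r1.1 ++ r2.1).map
        (fun cs => PySem.List.pyGetD (PySem.List.pyGetD p ((i : Int) - 1) []) ((j : Int) - 1) 0 :: cs)
      (v, r2.2.insert ((i : Int), (j : Int)) v)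
termination_by i + j
decreasing_by all_goals omega

def diccionarioCaminos_alt (p : List (List Int)) : List (Int × Int × List (List Int)) :=
  let m : Int := p.length
  let n : Int := ((PySem.List.pyGetD p 0 []).length : Int)
  let memo : PySem.Dict (Int × Int) (List (List Int)) :=
    (PySem.List.pyRange 1 (m + 1) 1).foldl (fun memo i =>
      (PySem.List.pyRange 1 (n + 1) 1).foldl (fun memo j =>
        (pathsAlt p i.toNat j.toNat memo).2) memo)
      PySem.Dict.empty
  memo.items.map (fun kv => (kv.1.1, kv.1.2, kv.2))

-- ===== PRECONDITION & SPEC =====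
-- Pre_ excludes exactly the IndexError inputs: empty p (A evaluates p[0]) and matrices
-- with a row shorter than the first row (A reads p[i-1][j-1] there); A raises on all of
-- them and returns on everything else.
def Pre_diccionarioCaminos (p : List (List Int)) : Prop :=
  p ≠ [] ∧ ∀ r ∈ p, (PySem.List.pyGetD p 0 []).length ≤ r.length
instance (p : List (List Int)) : Decidable (Pre_diccionarioCaminos p) := by
  unfold Pre_diccionarioCaminos; infer_instance

def pvWitness_diccionarioCaminos : List (List Int) := [[1, 2], [3, 4]]

def Spec_diccionarioCaminos (p : List (List Int)) (out : List (Int × Int × List (List Int))) : Prop := out = diccionarioCaminos_alt p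
instance (p : List (List Int)) (out : List (Int × Int × List (List Int))) : Decidable (Spec_diccionarioCaminos p out) := by unfold Spec_diccionarioCaminos; infer_instance

-- ===== CLAIM (what is proved, stated in full; the proofs are below) =====
def Claim_equal_diccionarioCaminos : Prop := ∀ (p : List (List Int)), Dom_diccionarioCaminos p → Pre_diccionarioCaminos p → Spec_diccionarioCaminos p (diccionarioCaminos p)

-- ===== LEMMAS AND PROOFS =====

-- The common mathematical value of cell (i, j): the list of monotone paths, in the
-- order both programs produce it (up-paths before left-paths).
def cellP (p : List (List Int)) (i j : Int) : List (List Int) :=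
  if i ≤ 1 then
    [(PySem.List.pyRange j 0 (-1)).map
      (fun z => PySem.List.pyGetD (PySem.List.pyGetD p 0 []) (z - 1) 0)]
  else if j ≤ 1 then
    [(PySem.List.pyRange i 0 (-1)).map
      (fun z => PySem.List.pyGetD (PySem.List.pyGetD p (z - 1) []) 0 0)]
  else
    (cellP p (i - 1) j ++ cellP p i (j - 1)).map
      (fun cs => PySem.List.pyGetD (PySem.List.pyGetD p (i - 1) []) (j - 1) 0 :: cs)
termination_by (i + j).toNat
decreasing_by all_goals omega

-- The dictionary holding cellP at every key of L.
def mkD (p : List (List Int)) (L : List (Int × Int)) : PySem.Dict (Int × Int) (List (List Int)) :=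
  L.foldl (fun d c => d.insert c (cellP p c.1 c.2)) PySem.Dict.empty

-- Keys processed so far: rows 1..a-1 complete, row a up to column b (all 1-based).
def cellsB (n a b : Nat) : List (Int × Int) :=
  (PySem.List.pyRange 1 (a : Int) 1).flatMap
    (fun x => (PySem.List.pyRange 1 ((n : Int) + 1) 1).map (fun y => (x, y)))
  ++ (PySem.List.pyRange 1 ((b : Int) + 1) 1).map (fun y => ((a : Int), y))

lemma mem_cellsB {n a b : Nat} {c : Int × Int} :
    c ∈ cellsB n a b ↔
      (1 ≤ c.1 ∧ c.1 < (a : Int) ∧ 1 ≤ c.2 ∧ c.2 ≤ (n : Int)) ∨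
      (c.1 = (a : Int) ∧ 1 ≤ c.2 ∧ c.2 ≤ (b : Int)) := by
  obtain ⟨x, y⟩ := c
  simp only [cellsB, List.mem_append, List.mem_flatMap, List.mem_map,
    PySem.List.mem_pyRange_one, Prod.ext_iff]
  constructor
  · rintro (⟨z, hz, w, hw, h1, h2⟩ | ⟨w, hw, h1, h2⟩) <;> [left; right] <;> simp_all
  · rintro (⟨h1, h2, h3, h4⟩ | ⟨rfl, h1, h2⟩)
    · exact Or.inl ⟨x, ⟨h1, h2⟩, y, ⟨h3, by omega⟩, rfl, rfl⟩
    · exact Or.inr ⟨y, ⟨h1, by omega⟩, rfl, rfl⟩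

lemma cellsB_succ_col (n a b : Nat) :
    cellsB n a b ++ [((a : Int), (b : Int) + 1)] = cellsB n a (b + 1) := by
  simp only [cellsB, List.append_assoc]
  congr 1
  have : (((b + 1 : Nat)) : Int) + 1 = ((b : Int) + 1) + 1 := by push_cast; ring
  rw [this, PySem.List.pyRange_one_succ_right (a := 1) (b := (b : Int) + 1) (by omega)]
  simp

lemma cellsB_row_complete (n a : Nat) (ha : 1 ≤ a) :
    cellsB n a n = cellsB n (a + 1) 0 := by
  simp only [cellsB]
  have : (((a + 1 : Nat)) : Int) = (a : Int) + 1 := by push_cast; ring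
  rw [this, PySem.List.pyRange_one_succ_right (a := 1) (b := (a : Int)) (by exact_mod_cast ha)]
  simp [PySem.List.pyRange_one_eq_nil]

lemma mkD_append_singleton (p : List (List Int)) (L : List (Int × Int)) (c : Int × Int) :
    mkD p (L ++ [c]) = (mkD p L).insert c (cellP p c.1 c.2) := by
  simp [mkD]

lemma get?_mkD_mem (p : List (List Int)) (L : List (Int × Int)) (c : Int × Int)
    (h : c ∈ L) : (mkD p L).get? c = some (cellP p c.1 c.2) := by
  induction L using List.reverseRecOn with
  | nil => simp at h
  | append_singleton L c' ih =>
    rw [mkD_append_singleton, PySem.Dict.get?_insert]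
    by_cases hc : c = c'
    · subst hc; simp
    · simp only [if_neg hc]
      exact ih (by simp at h; tauto)

lemma get?_mkD_not_mem (p : List (List Int)) (L : List (Int × Int)) (c : Int × Int)
    (h : c ∉ L) : (mkD p L).get? c = none := by
  induction L using List.reverseRecOn with
  | nil => simp [mkD, PySem.Dict.get?_empty]
  | append_singleton L c' ih =>
    rw [mkD_append_singleton, PySem.Dict.get?_insert]
    have hc : c ≠ c' := by intro hh; exact h (by simp [hh])
    simp only [if_neg hc]
    exact ih (fun hm => h (by simp [hm]))

lemma getD_mkD_mem (p : List (List Int)) (L : List (Int × Int)) (c : Int × Int)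
    (h : c ∈ L) : (mkD p L).getD c [] = cellP p c.1 c.2 := by
  rw [PySem.Dict.getD_eq_get?_getD, get?_mkD_mem p L c h]; rfl

-- reversed take as a countdown comprehension
lemma revtake {β γ : Type} (xs : List β) (h : β → γ) (d : β) (k : Int)
    (hk0 : 0 ≤ k) (hk : k ≤ (xs.length : Int)) :
    (PySem.List.pyRange k 0 (-1)).map (fun z => h (PySem.List.pyGetD xs (z - 1) d)) =
      ((xs.take k.toNat).map h).reverse := by
  rw [PySem.List.pyRange_neg_one]
  apply List.ext_getElem
  · simp; omega
  · intro t h1 h2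
    simp only [List.getElem_map, List.getElem_range, List.getElem_reverse,
      List.getElem_take]
    apply congrArg
    rw [PySem.List.pyGetD_eq_getElem xs d (by simp at h1 ⊢; omega) (by simp at h1 ⊢; omega)]
    have hidx : (k - ↑t - 1).toNat = (List.map h (List.take k.toNat xs)).length - 1 - t := by
      simp at h1 ⊢; omega
    simp [hidx]


-- cache hit: paths returns the memo value unchanged
lemma pathsAlt_hit (p : List (List Int)) (x y : Nat)
    (memo : PySem.Dict (Int × Int) (List (List Int))) (v : List (List Int))
    (h : memo.get? ((x : Int), (y : Int)) = some v) :
    pathsAlt p x y memo = (v, memo) := by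
  rw [pathsAlt, h]

-- B's one memoized step: with all earlier cells cached, paths (a, b) is one lookup /
-- base case / combination, returning cellP and the memo extended by (a, b).
lemma pathsAlt_step (p : List (List Int)) (hp : p ≠ [])
    (n0 : Nat) (hn0 : n0 = (PySem.List.pyGetD p 0 []).length)
    (a b : Nat) (ha : 1 ≤ a) (ham : a ≤ p.length) (hb : 1 ≤ b) (hbn : b ≤ n0) :
    pathsAlt p a b (mkD p (cellsB n0 a (b - 1))) =
      (cellP p (a : Int) (b : Int), mkD p (cellsB n0 a b)) := by
  have hcells : cellsB n0 a (b - 1) ++ [((a : Int), (b : Int))] = cellsB n0 a b := by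
    have h1 : (((b - 1 : Nat)) : Int) + 1 = (b : Int) := by omega
    have h2 := cellsB_succ_col n0 a (b - 1)
    rw [h1, Nat.sub_add_cancel hb] at h2
    exact h2
  have hins : ∀ v, v = cellP p (a : Int) (b : Int) →
      (mkD p (cellsB n0 a (b - 1))).insert ((a : Int), (b : Int)) v = mkD p (cellsB n0 a b) := by
    intro v hv
    rw [hv, ← hcells, mkD_append_singleton]
  have hget : (mkD p (cellsB n0 a (b - 1))).get? ((a : Int), (b : Int)) = none := by
    apply get?_mkD_not_mem
    intro hmem
    rcases mem_cellsB.mp hmem with h | h <;> simp at h <;> omega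
  rw [pathsAlt, hget]
  by_cases hA : a ≤ 1
  · have ha1 : a = 1 := by omega
    simp only [dif_pos hA]
    rw [PySem.List.slice?_none_none_neg_one]
    have hv : [(some (PySem.List.slice (PySem.List.pyGetD p 0 []) none (some (b:Int))).reverse).getD []]
        = cellP p (a : Int) (b : Int) := by
      have hrt := revtake (PySem.List.pyGetD p 0 []) id 0 (b : Int) (by omega) (by omega)
      simp only [id_eq, List.map_id] at hrt
      rw [cellP, if_pos (by exact_mod_cast hA), hrt, PySem.List.slice_to_natCast]
      simp
    rw [hv, hins _ rfl]
  · by_cases hB : b ≤ 1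
    · have hb1 : b = 1 := by omega
      simp only [dif_neg hA, dif_pos hB]
      rw [PySem.List.slice?_none_none_neg_one]
      have hv : [(some (List.map (fun r => PySem.List.pyGetD r 0 0) (PySem.List.slice p none (some (a:Int)))).reverse).getD []]
          = cellP p (a : Int) (b : Int) := by
        have hrt := revtake p (fun r => PySem.List.pyGetD r 0 0) [] (a : Int) (by omega) (by omega)
        rw [cellP, if_neg (by simp; omega), if_pos (by exact_mod_cast hB), hrt,
          PySem.List.slice_to_natCast]
        simp
      rw [hv, hins _ rfl]
    · simp only [dif_neg hA, dif_neg hB]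
      have hm1 : (((a - 1 : Nat) : Int), (b : Int)) ∈ cellsB n0 a (b - 1) := by
        exact mem_cellsB.mpr (Or.inl ⟨by omega, by omega, by omega, by omega⟩)
      have hm2 : (((a : Nat) : Int), ((b - 1 : Nat) : Int)) ∈ cellsB n0 a (b - 1) := by
        exact mem_cellsB.mpr (Or.inr ⟨by omega, by omega, by omega⟩)
      rw [pathsAlt_hit p (a - 1) b _ _ (get?_mkD_mem p _ _ hm1),
          pathsAlt_hit p a (b - 1) _ _ (get?_mkD_mem p _ _ hm2)]
    -- value
      have e1 : (((a - 1 : Nat)) : Int) = (a : Int) - 1 := by omega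
      have e2 : (((b - 1 : Nat)) : Int) = (b : Int) - 1 := by omega
      have hval : (cellP p (((a - 1 : Nat)) : Int) (b : Int) ++
            cellP p ((a : Nat) : Int) (((b - 1 : Nat)) : Int)).map
            (fun cs => PySem.List.pyGetD (PySem.List.pyGetD p ((a : Int) - 1) []) ((b : Int) - 1) 0 :: cs)
          = cellP p (a : Int) (b : Int) := by
        conv_rhs => rw [cellP]
        rw [if_neg (by simp; omega), if_neg (by simp; omega), e1, e2]
      rw [hval, hins _ rfl]

-- A's one step: the loop body maps the prefix dict to the next prefix dict.
lemma stepA (p : List (List Int)) (hp : p ≠ [])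
    (n0 : Nat) (hn0 : n0 = (PySem.List.pyGetD p 0 []).length)
    (a b : Nat) (ha : 1 ≤ a) (ham : a ≤ p.length) (hb : 1 ≤ b) (hbn : b ≤ n0) :
    (fun (q : PySem.Dict (Int × Int) (List (List Int))) (j : Int) =>
        if (a : Int) = 1 then
          q.insert ((a : Int), j)
            [(PySem.List.pyRange j 0 (-1)).map
              (fun z => PySem.List.pyGetD (PySem.List.pyGetD p 0 []) (z - 1) 0)]
        else if j = 1 then
          q.insert ((a : Int), j)
            [(PySem.List.pyRange (a : Int) 0 (-1)).map
              (fun z => PySem.List.pyGetD (PySem.List.pyGetD p (z - 1) []) 0 0)]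
        else
          q.insert ((a : Int), j)
            ((q.getD ((a : Int) - 1, j) [] ++ q.getD ((a : Int), j - 1) []).map
              (fun cs => PySem.List.pyGetD (PySem.List.pyGetD p ((a : Int) - 1) []) (j - 1) 0 :: cs)))
      (mkD p (cellsB n0 a (b - 1))) (b : Int) = mkD p (cellsB n0 a b) := by
  have hcells : cellsB n0 a (b - 1) ++ [((a : Int), (b : Int))] = cellsB n0 a b := by
    have h1 : (((b - 1 : Nat)) : Int) + 1 = (b : Int) := by omega
    have h2 := cellsB_succ_col n0 a (b - 1)
    rw [h1, Nat.sub_add_cancel hb] at h2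
    exact h2
  have hins : ∀ v, v = cellP p (a : Int) (b : Int) →
      (mkD p (cellsB n0 a (b - 1))).insert ((a : Int), (b : Int)) v = mkD p (cellsB n0 a b) := by
    intro v hv
    rw [hv, ← hcells, mkD_append_singleton]
  simp only
  by_cases hA : (a : Int) = 1
  · rw [if_pos hA]
    apply hins
    rw [cellP, if_pos (by omega)]
  · rw [if_neg hA]
    by_cases hB : (b : Int) = 1
    · rw [if_pos hB]
      apply hins
      rw [cellP, if_neg (by omega), if_pos (by omega)]
    · rw [if_neg hB]
      have hm1 : (((a : Int) - 1), (b : Int)) ∈ cellsB n0 a (b - 1) := by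
        exact mem_cellsB.mpr (Or.inl ⟨by omega, by omega, by omega, by omega⟩)
      have hm2 : ((a : Int), ((b : Int) - 1)) ∈ cellsB n0 a (b - 1) := by
        exact mem_cellsB.mpr (Or.inr ⟨by omega, by omega, by omega⟩)
      rw [getD_mkD_mem p _ _ hm1, getD_mkD_mem p _ _ hm2]
      apply hins
      conv_rhs => rw [cellP]
      rw [if_neg (by omega), if_neg (by omega)]

-- inner loop of A over one row
lemma innerA (p : List (List Int)) (hp : p ≠ [])
    (n0 : Nat) (hn0 : n0 = (PySem.List.pyGetD p 0 []).length)
    (a : Nat) (ha : 1 ≤ a) (ham : a ≤ p.length) :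
    ∀ b : Nat, b ≤ n0 →
    (PySem.List.pyRange 1 ((b : Int) + 1) 1).foldl
      (fun (q : PySem.Dict (Int × Int) (List (List Int))) (j : Int) =>
        if (a : Int) = 1 then
          q.insert ((a : Int), j)
            [(PySem.List.pyRange j 0 (-1)).map
              (fun z => PySem.List.pyGetD (PySem.List.pyGetD p 0 []) (z - 1) 0)]
        else if j = 1 then
          q.insert ((a : Int), j)
            [(PySem.List.pyRange (a : Int) 0 (-1)).map
              (fun z => PySem.List.pyGetD (PySem.List.pyGetD p (z - 1) []) 0 0)]
        else
          q.insert ((a : Int), j)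
            ((q.getD ((a : Int) - 1, j) [] ++ q.getD ((a : Int), j - 1) []).map
              (fun cs => PySem.List.pyGetD (PySem.List.pyGetD p ((a : Int) - 1) []) (j - 1) 0 :: cs)))
      (mkD p (cellsB n0 a 0)) = mkD p (cellsB n0 a b) := by
  intro b
  induction b with
  | zero =>
    intro _
    rw [show ((0 : Nat) : Int) + 1 = 1 by simp, PySem.List.pyRange_one_eq_nil (le_refl 1)]
    rfl
  | succ b ih =>
    intro hb
    have hc : (((b + 1 : Nat)) : Int) + 1 = ((b : Int) + 1) + 1 := by push_cast; ring
    rw [hc, PySem.List.pyRange_one_succ_right (by omega), List.foldl_append, ih (by omega),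
      List.foldl_cons, List.foldl_nil]
    have hc2 : ((b : Int) + 1) = (((b + 1 : Nat)) : Int) := by push_cast; ring
    rw [hc2]
    exact stepA p hp n0 hn0 a (b + 1) ha ham (by omega) (by omega)

-- inner loop of B over one row
lemma innerB (p : List (List Int)) (hp : p ≠ [])
    (n0 : Nat) (hn0 : n0 = (PySem.List.pyGetD p 0 []).length)
    (a : Nat) (ha : 1 ≤ a) (ham : a ≤ p.length) :
    ∀ b : Nat, b ≤ n0 →
    (PySem.List.pyRange 1 ((b : Int) + 1) 1).foldl
      (fun (memo : PySem.Dict (Int × Int) (List (List Int))) (j : Int) =>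
        (pathsAlt p a j.toNat memo).2)
      (mkD p (cellsB n0 a 0)) = mkD p (cellsB n0 a b) := by
  intro b
  induction b with
  | zero =>
    intro _
    rw [show ((0 : Nat) : Int) + 1 = 1 by simp, PySem.List.pyRange_one_eq_nil (le_refl 1)]
    rfl
  | succ b ih =>
    intro hb
    have hc : (((b + 1 : Nat)) : Int) + 1 = ((b : Int) + 1) + 1 := by push_cast; ring
    rw [hc, PySem.List.pyRange_one_succ_right (by omega), List.foldl_append, ih (by omega),
      List.foldl_cons, List.foldl_nil]
    have hc2 : ((b : Int) + 1) = (((b + 1 : Nat)) : Int) := by push_cast; ring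
    rw [hc2, Int.toNat_natCast]
    have hst := pathsAlt_step p hp n0 hn0 a (b + 1) ha ham (by omega) (by omega)
    simp only [Nat.add_sub_cancel] at hst
    rw [hst]

lemma cellsB_one_zero (n : Nat) : cellsB n 1 0 = [] := by
  simp [cellsB, PySem.List.pyRange_one_eq_nil]

-- outer loop of A
lemma outerA (p : List (List Int)) (hp : p ≠ [])
    (n0 : Nat) (hn0 : n0 = (PySem.List.pyGetD p 0 []).length) :
    ∀ a : Nat, a ≤ p.length →
    (PySem.List.pyRange 1 ((a : Int) + 1) 1).foldl
      (fun (q : PySem.Dict (Int × Int) (List (List Int))) (i : Int) =>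
        (PySem.List.pyRange 1 ((n0 : Int) + 1) 1).foldl
          (fun (q : PySem.Dict (Int × Int) (List (List Int))) (j : Int) =>
            if i = 1 then
              q.insert (i, j)
                [(PySem.List.pyRange j 0 (-1)).map
                  (fun z => PySem.List.pyGetD (PySem.List.pyGetD p 0 []) (z - 1) 0)]
            else if j = 1 then
              q.insert (i, j)
                [(PySem.List.pyRange i 0 (-1)).map
                  (fun z => PySem.List.pyGetD (PySem.List.pyGetD p (z - 1) []) 0 0)]
            else
              q.insert (i, j)
                ((q.getD (i - 1, j) [] ++ q.getD (i, j - 1) []).map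
                  (fun cs => PySem.List.pyGetD (PySem.List.pyGetD p (i - 1) []) (j - 1) 0 :: cs)))
          q)
      PySem.Dict.empty = mkD p (cellsB n0 (a + 1) 0) := by
  intro a
  induction a with
  | zero =>
    intro _
    rw [show ((0 : Nat) : Int) + 1 = 1 by simp, PySem.List.pyRange_one_eq_nil (le_refl 1)]
    rw [cellsB_one_zero]
    rfl
  | succ a ih =>
    intro hlen
    have hc : (((a + 1 : Nat)) : Int) + 1 = ((a : Int) + 1) + 1 := by push_cast; ring
    rw [hc, PySem.List.pyRange_one_succ_right (a := 1) (b := (a : Int) + 1) (by omega),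
      List.foldl_append, ih (by omega), List.foldl_cons, List.foldl_nil]
    have hc2 : ((a : Int) + 1) = (((a + 1 : Nat)) : Int) := by push_cast; ring
    rw [hc2, innerA p hp n0 hn0 (a + 1) (by omega) hlen n0 (le_refl n0),
      cellsB_row_complete n0 (a + 1) (by omega)]

-- outer loop of B
lemma outerB (p : List (List Int)) (hp : p ≠ [])
    (n0 : Nat) (hn0 : n0 = (PySem.List.pyGetD p 0 []).length) :
    ∀ a : Nat, a ≤ p.length →
    (PySem.List.pyRange 1 ((a : Int) + 1) 1).foldl
      (fun (memo : PySem.Dict (Int × Int) (List (List Int))) (i : Int) =>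
        (PySem.List.pyRange 1 ((n0 : Int) + 1) 1).foldl
          (fun (memo : PySem.Dict (Int × Int) (List (List Int))) (j : Int) =>
            (pathsAlt p i.toNat j.toNat memo).2)
          memo)
      PySem.Dict.empty = mkD p (cellsB n0 (a + 1) 0) := by
  intro a
  induction a with
  | zero =>
    intro _
    rw [show ((0 : Nat) : Int) + 1 = 1 by simp, PySem.List.pyRange_one_eq_nil (le_refl 1)]
    rw [cellsB_one_zero]
    rfl
  | succ a ih =>
    intro hlen
    have hc : (((a + 1 : Nat)) : Int) + 1 = ((a : Int) + 1) + 1 := by push_cast; ring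
    rw [hc, PySem.List.pyRange_one_succ_right (a := 1) (b := (a : Int) + 1) (by omega),
      List.foldl_append, ih (by omega), List.foldl_cons, List.foldl_nil]
    have hc2 : ((a : Int) + 1) = (((a + 1 : Nat)) : Int) := by push_cast; ring
    rw [hc2]
    simp only [Int.toNat_natCast]
    rw [innerB p hp n0 hn0 (a + 1) (by omega) hlen n0 (le_refl n0),
      cellsB_row_complete n0 (a + 1) (by omega)]

theorem diccionarioCaminos_spec : Claim_equal_diccionarioCaminos := by
  intro p _hdom hpre
  obtain ⟨hp, hrows⟩ := hpre
  unfold Spec_diccionarioCaminos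
  show diccionarioCaminos p = diccionarioCaminos_alt p
  simp only [diccionarioCaminos, diccionarioCaminos_alt]
  rw [outerA p hp _ rfl p.length (le_refl _), outerB p hp _ rfl p.length (le_refl _)]
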